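-- pv_equiv track=rewrite | github.com/gizmo87898/2019ChargerClusterController | LandRover.py | format_text_to_can_chunks
-- ===== SOURCE A (Python) =====
-- def format_text_to_can_chunks(text, input):
--     firstline = True
--     # Convert each character to its ASCII hex representation interleaved with "00"
--     formatted_text = [f"00 {ord(char):02X}" for char in text]
--
--     # Flatten list into a single array of hex numbers
--     formatted_text = ' '.join(formatted_text).split()
--
--     # Each chunk should fit in 6 hex values (3 characters)
--     chunks = [formatted_text[i:i + 6] for i in range(0, len(formatted_text), 6)]
--
--     # Create CAN message chunks with the start_byte and a line code that increments by 0x10 each message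
--     can_chunks = []
--
--     #up until here, it works and generates data[2]-[7] correctly.
--     start_byte = len(chunks)
--     for i, chunk in enumerate(chunks):
--         # Start byte with the incremented line code
--         can_data = [(start_byte - (i+1))*0x10]
--
--         can_data.append((firstline*0x40)+input)
--         # Add up to 6 hex values to fit within 8 bytes total, padding with 0 if necessary
--         can_data.extend(int(chunk[j], 16) if j < len(chunk) else 0 for j in range(6))
--         firstline = False
--         can_chunks.append(can_data[:8])  # Ensure each CAN message is exactly 8 bytes
--
--     # Add an end-of-message frame (all zeros)
--     can_chunks.append([0x00] * 8)
--     return can_chunks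
-- ===== SOURCE B (Python) =====
-- def format_text_to_can_chunks(text, input):
--     # Build each 8-byte frame directly from a 3-character slice of the text,
--     # skipping A's hex-string/join/split round trip.
--     n_chunks = (len(text) + 2) // 3
--     out = []
--     for i in range(n_chunks):
--         frame = [(n_chunks - (i + 1)) * 0x10, (0x40 if i == 0 else 0) + input]
--         for c in text[3 * i:3 * i + 3]:
--             frame.append(0)
--             frame.append(ord(c))
--         frame.extend([0] * (8 - len(frame)))
--         out.append(frame)
--     out.append([0x00] * 8)
--     return out
-- ===== Notes on version B (the rewrite author's own statement) =====
-- stated objective: simpler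
-- what changed: B drops A's hex-string intermediate (format each char to a '00 XX' string, join, split, re-chunk the token list by 6, parse tokens back with int(.,16)) and instead slices the text into 3-character groups, emitting each frame's bytes directly from ord(c).
import Mathlib
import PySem

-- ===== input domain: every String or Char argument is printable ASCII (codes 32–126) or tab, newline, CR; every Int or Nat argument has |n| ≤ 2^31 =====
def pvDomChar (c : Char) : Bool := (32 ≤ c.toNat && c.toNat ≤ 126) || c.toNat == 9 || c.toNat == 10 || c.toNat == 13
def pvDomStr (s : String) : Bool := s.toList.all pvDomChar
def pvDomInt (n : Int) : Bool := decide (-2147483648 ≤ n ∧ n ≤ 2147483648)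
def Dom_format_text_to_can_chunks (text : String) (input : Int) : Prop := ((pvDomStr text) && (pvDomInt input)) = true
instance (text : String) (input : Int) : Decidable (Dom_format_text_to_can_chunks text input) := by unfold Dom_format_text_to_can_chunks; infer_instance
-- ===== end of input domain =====

-- B replaces A's hex-string intermediate (format/join/split/re-chunk/int-parse) by direct
-- 3-character slicing of the text; same frames, objective: simpler.

-- ===== PORT A =====

-- f"{n:X}" digit for n < 16 (uppercase)
def pvHexDigit (n : Nat) : Char := if n < 10 then Char.ofNat (48 + n) else Char.ofNat (55 + n)

-- hex-digit loop of "{n:X}" with explicit fuel (fuel = n suffices; structural, kernel-reducible)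
def pvHexGo : Nat → Nat → List Char
  | _, 0 => []
  | 0, _ => []
  | fuel + 1, n => pvHexGo fuel (n / 16) ++ [pvHexDigit (n % 16)]

-- uppercase hex digits of n, most significant first ([] for 0)
def pvHexRec (n : Nat) : List Char := pvHexGo n n

-- f"{n:02X}": hex digits, zero-padded on the left to width 2
def pvFmt02X (n : Nat) : List Char :=
  let ds := if n = 0 then ['0'] else pvHexRec n
  List.replicate (2 - ds.length) '0' ++ ds

def format_text_to_can_chunks (text : String) (input : Int) : List (List Int) :=
  -- formatted_text = [f"00 {ord(char):02X}" for char in text]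
  let formatted0 := text.toList.map (fun ch => ['0', '0', ' '] ++ pvFmt02X ch.toNat)
  -- formatted_text = ' '.join(formatted_text).split()
  let formatted := PySem.Chars.split₀ (PySem.Chars.join [' '] formatted0)
  -- chunks = [formatted_text[i:i+6] for i in range(0, len(formatted_text), 6)]
  let chunks := (PySem.List.pyRange 0 (formatted.length : Int) 6).map
      (fun i => PySem.List.slice formatted (some i) (some (i + 6)))
  -- for i, chunk in enumerate(chunks): … (state = (firstline, can_chunks))
  let st := chunks.zipIdx.foldl
    (fun (st : Bool × List (List Int)) p =>
      let chunk := p.1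
      let can_data : List Int := [((chunks.length : Int) - ((p.2 : Int) + 1)) * 16]
      let can_data := can_data ++ [(if st.1 then (1 : Int) else 0) * 64 + input]
      -- int(chunk[j], 16): the tokens always parse as hex, so getD 0 is never taken
      let can_data := can_data ++ (List.range 6).map (fun j =>
        if j < chunk.length then (PySem.Int.ofCharsBase? (chunk.getD j []) 16).getD 0 else 0)
      (false, st.2 ++ [can_data.take 8]))
    (true, [])
  st.2 ++ [List.replicate 8 (0 : Int)]

-- ===== PORT B =====

def format_text_to_can_chunks_alt (text : String) (input : Int) : List (List Int) :=
  let cs := text.toList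
  let n := (cs.length + 2) / 3
  (List.range n).map (fun (i : Nat) =>
    let frame : List Int := [((n : Int) - ((i : Int) + 1)) * 16, (if i = 0 then (64 : Int) else 0) + input]
    -- for c in text[3*i:3*i+3]: frame += [0, ord(c)]
    let frame := frame ++ (List.take 3 (List.drop (3 * i) cs)).flatMap (fun c => [(0 : Int), (c.toNat : Int)])
    -- frame.extend([0] * (8 - len(frame)))
    frame ++ List.replicate (8 - frame.length) (0 : Int))
  ++ [List.replicate 8 (0 : Int)]

-- ===== PRECONDITION & SPEC =====
def Spec_format_text_to_can_chunks (text : String) (input : Int) (out : List (List Int)) : Prop := out = format_text_to_can_chunks_alt text input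
instance (text : String) (input : Int) (out : List (List Int)) : Decidable (Spec_format_text_to_can_chunks text input out) := by unfold Spec_format_text_to_can_chunks; infer_instance

-- ===== CLAIM (what is proved, stated in full; the proofs are below) =====
def Claim_equal_format_text_to_can_chunks : Prop := ∀ (text : String) (input : Int), Dom_format_text_to_can_chunks text input → Spec_format_text_to_can_chunks text input (format_text_to_can_chunks text input)

-- ===== LEMMAS AND PROOFS =====

theorem go_nil (cur acc) : PySem.Chars.split₀.go [] cur acc =
    (if cur.isEmpty then acc.reverse else (cur.reverse :: acc).reverse) := by
  simp [PySem.Chars.split₀.go]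

theorem go_cons (c rest cur acc) : PySem.Chars.split₀.go (c :: rest) cur acc =
    (if PySem.Chars.isspace c then
       (if cur.isEmpty then PySem.Chars.split₀.go rest [] acc
        else PySem.Chars.split₀.go rest [] (cur.reverse :: acc))
     else PySem.Chars.split₀.go rest (c :: cur) acc) := by
  simp [PySem.Chars.split₀.go]

set_option maxRecDepth 4096 in
theorem parse_tok : ∀ n < 128, PySem.Int.ofCharsBase? (pvFmt02X n) 16 = some (n : Int) := by decide
theorem isspace_hexDigit : ∀ k < 16, PySem.Chars.isspace (pvHexDigit k) = false := by decide

theorem mem_pvHexGo : ∀ fuel n c, c ∈ pvHexGo fuel n → ∃ k, k < 16 ∧ c = pvHexDigit k := by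
  intro fuel
  induction fuel with
  | zero => intro n c h; cases n <;> simp [pvHexGo] at h
  | succ m ih =>
    intro n c h
    cases n with
    | zero => simp [pvHexGo] at h
    | succ n' =>
      simp only [pvHexGo, List.mem_append, List.mem_singleton] at h
      rcases h with h | h
      · exact ih _ _ h
      · exact ⟨(n' + 1) % 16, Nat.mod_lt _ (by norm_num), h⟩

theorem tok_nonempty (n : Nat) : pvFmt02X n ≠ [] := by
  unfold pvFmt02X
  by_cases h : n = 0 <;> simp [h]
  cases n with
  | zero => exact absurd rfl h
  | succ n' => simp [pvHexRec, pvHexGo]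

theorem tok_nonspace (n : Nat) : ∀ c ∈ pvFmt02X n, PySem.Chars.isspace c = false := by
  intro c hc
  unfold pvFmt02X at hc
  simp only [List.mem_append, List.mem_replicate] at hc
  rcases hc with ⟨_, rfl⟩ | hc
  · decide
  · by_cases h : n = 0
    · simp [h] at hc; subst hc; decide
    · simp [h, pvHexRec] at hc
      obtain ⟨k, hk, rfl⟩ := mem_pvHexGo _ _ _ hc
      exact isspace_hexDigit k hk
-- consuming a non-whitespace block
theorem go_block : ∀ (t : List Char), (∀ c ∈ t, PySem.Chars.isspace c = false) →
    ∀ rest cur acc, PySem.Chars.split₀.go (t ++ rest) cur acc =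
      PySem.Chars.split₀.go rest (t.reverse ++ cur) acc := by
  intro t
  induction t with
  | nil => intro _ rest cur acc; simp
  | cons c t ih =>
    intro h rest cur acc
    rw [List.cons_append, go_cons, h c (by simp)]
    simp only [Bool.false_eq_true, if_false]
    rw [ih (fun x hx => h x (by simp [hx]))]
    simp

theorem go_intercalate : ∀ (toks : List (List Char)),
    (∀ t ∈ toks, t ≠ [] ∧ ∀ c ∈ t, PySem.Chars.isspace c = false) →
    ∀ acc, PySem.Chars.split₀.go (List.intercalate [' '] toks) [] acc = acc.reverse ++ toks := by
  intro toks
  induction toks with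
  | nil => intro _ acc; simp [List.intercalate, go_nil]
  | cons t rest ih =>
    intro h acc
    obtain ⟨hne, hns⟩ := h t (by simp)
    cases rest with
    | nil =>
      rw [show List.intercalate [' '] [t] = t ++ [] by simp [List.intercalate],
          go_block t hns, go_nil]
      simp [List.isEmpty_iff, hne]
    | cons t2 rest2 =>
      rw [show List.intercalate [' '] (t :: t2 :: rest2)
            = t ++ (' ' :: List.intercalate [' '] (t2 :: rest2)) by simp [List.intercalate],
          go_block t hns, go_cons]
      simp only [show PySem.Chars.isspace ' ' = true from rfl, if_true,
        List.isEmpty_iff, List.append_nil]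
      rw [if_neg (by simpa using hne)]
      rw [ih (fun x hx => h x (by simp [hx])) (t.reverse.reverse :: acc)]
      simp

theorem split_intercalate (toks : List (List Char))
    (h : ∀ t ∈ toks, t ≠ [] ∧ ∀ c ∈ t, PySem.Chars.isspace c = false) :
    PySem.Chars.split₀ (List.intercalate [' '] toks) = toks := by
  rw [PySem.Chars.split₀]
  simpa using go_intercalate toks h []
-- flat token list of the text
def pvToks (cs : List Char) : List (List Char) := cs.flatMap (fun c => [['0', '0'], pvFmt02X c.toNat])

theorem inter_step (l : List Char) (ls : List (List Char)) :
    List.intercalate [' '] (l :: ls)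
      = l ++ (if ls = [] then [] else [' '] ++ List.intercalate [' '] ls) := by
  cases ls <;> simp [List.intercalate]

theorem join_eq_intercalate (cs : List Char) :
    PySem.Chars.join [' '] (cs.map (fun c => ['0', '0', ' '] ++ pvFmt02X c.toNat))
      = List.intercalate [' '] (pvToks cs) := by
  rw [PySem.Chars.join]
  induction cs with
  | nil => simp [pvToks, List.intercalate]
  | cons c rest ih =>
    rw [List.map_cons, inter_step,
        show pvToks (c :: rest) = ['0','0'] :: pvFmt02X c.toNat :: pvToks rest by simp [pvToks],
        inter_step, inter_step, ih]
    cases rest with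
    | nil => simp [pvToks]
    | cons c2 rest2 =>
      have h2 : pvToks (c2 :: rest2) = ['0','0'] :: pvFmt02X c2.toNat :: pvToks rest2 := by
        simp [pvToks]
      have h2ne : pvToks (c2 :: rest2) ≠ [] := by rw [h2]; simp
      rw [if_neg (show ¬List.map (fun c => ['0', '0', ' '] ++ pvFmt02X c.toNat) (c2 :: rest2) = [] by simp),
          if_neg (show ¬(pvFmt02X c.toNat :: pvToks (c2 :: rest2)) = [] by simp),
          if_neg h2ne, h2, inter_step]
      rw [if_neg (show ¬(pvFmt02X c2.toNat :: pvToks rest2) = [] by simp)]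
      simp
set_option maxRecDepth 8192 in
theorem split_join_toks (cs : List Char) :
    PySem.Chars.split₀ (PySem.Chars.join [' ']
      (cs.map (fun c => ['0', '0', ' '] ++ pvFmt02X c.toNat))) = pvToks cs := by
  rw [join_eq_intercalate]
  apply split_intercalate
  intro t ht
  simp only [pvToks, List.mem_flatMap] at ht
  obtain ⟨c, -, ht⟩ := ht
  simp only [List.mem_cons] at ht
  rcases ht with rfl | rfl | h
  · refine ⟨by simp, ?_⟩
    intro ch hch
    fin_cases hch <;> rfl
  · exact ⟨tok_nonempty _, tok_nonspace _⟩
  · simp at h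

theorem toks_length (cs : List Char) : (pvToks cs).length = 2 * cs.length := by
  induction cs with
  | nil => simp [pvToks]
  | cons c rest ih => simp [pvToks] at ih ⊢; omega

theorem toks_drop (cs : List Char) : ∀ a, (pvToks cs).drop (2 * a) = pvToks (cs.drop a) := by
  induction cs with
  | nil => intro a; simp [pvToks]
  | cons c rest ih =>
    intro a
    cases a with
    | zero => simp
    | succ a' =>
      rw [show 2 * (a' + 1) = (2 * a') + 1 + 1 by ring,
          show pvToks (c :: rest) = ['0','0'] :: pvFmt02X c.toNat :: pvToks rest by simp [pvToks]]
      simpa using ih a'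

theorem toks_take (cs : List Char) : ∀ b, (pvToks cs).take (2 * b) = pvToks (cs.take b) := by
  induction cs with
  | nil => intro b; simp [pvToks]
  | cons c rest ih =>
    intro b
    cases b with
    | zero => simp [pvToks]
    | succ b' =>
      rw [show 2 * (b' + 1) = (2 * b') + 1 + 1 by ring,
          show pvToks (c :: rest) = ['0','0'] :: pvFmt02X c.toNat :: pvToks rest by simp [pvToks]]
      simp only [List.take_succ_cons, ih b']
      simp [pvToks]
theorem foldl_firstline {α β : Type} (body : Bool → α × Nat → β) :
    ∀ (l : List α) (j : Nat) (acc : List β),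
      ((l.zipIdx j).foldl (fun st p => (false, st.2 ++ [body st.1 p])) (decide (j = 0), acc)).2
        = acc ++ (l.zipIdx j).map (fun p => body (decide (p.2 = 0)) p) := by
  intro l
  induction l with
  | nil => intro j acc; simp
  | cons a l ih =>
    intro j acc
    rw [List.zipIdx_cons, List.foldl_cons, List.map_cons]
    have : (false : Bool) = decide (j + 1 = 0) := by simp
    have hstep : (List.foldl (fun (st : Bool × List β) p => (false, st.2 ++ [body st.1 p]))
        (false, (decide (j = 0), acc).2 ++ [body (decide (j = 0), acc).1 (a, j)]) (l.zipIdx (j + 1))).2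
        = (List.foldl (fun (st : Bool × List β) p => (false, st.2 ++ [body st.1 p]))
        (decide (j + 1 = 0), acc ++ [body (decide (j = 0)) (a, j)]) (l.zipIdx (j + 1))).2 := by
      rw [← this]
    rw [hstep, ih (j + 1) (acc ++ [body (decide (j = 0)) (a, j)])]
    simp
theorem parse00 : (PySem.Int.ofCharsBase? ['0','0'] 16).getD 0 = 0 := by decide

theorem frame_eq (d : List Char) (hlen : d.length ≤ 3) (h128 : ∀ c ∈ d, c.toNat < 128)
    (h1 h2 : Int) :
    (h1 :: h2 :: (List.range 6).map (fun j =>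
        if j < (pvToks d).length then (PySem.Int.ofCharsBase? ((pvToks d).getD j []) 16).getD 0 else 0))
      = (h1 :: h2 :: d.flatMap (fun c => [(0 : Int), (c.toNat : Int)]))
          ++ List.replicate (8 - (h1 :: h2 :: d.flatMap (fun c => [(0 : Int), (c.toNat : Int)])).length) 0 := by
  have hp : ∀ c ∈ d, (PySem.Int.ofCharsBase? (pvFmt02X c.toNat) 16).getD 0 = (c.toNat : Int) := by
    intro c hc; rw [parse_tok c.toNat (h128 c hc)]; rfl
  match d, hlen with
  | [], _ => simp [pvToks, List.range_succ]
  | [a], _ =>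
    have := hp a (by simp)
    simp [pvToks, List.range_succ, parse00, this]
  | [a, b], _ =>
    have ha := hp a (by simp); have hb := hp b (by simp)
    simp [pvToks, List.range_succ, parse00, ha, hb]
  | [a, b, c], _ =>
    have ha := hp a (by simp); have hb := hp b (by simp); have hc := hp c (by simp)
    simp [pvToks, List.range_succ, parse00, ha, hb, hc]
theorem ports_eq (text : String) (input : Int)
    (h128 : ∀ c ∈ text.toList, c.toNat < 128) :
    format_text_to_can_chunks text input = format_text_to_can_chunks_alt text input := by
  unfold format_text_to_can_chunks format_text_to_can_chunks_alt
  simp only [split_join_toks]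
  set cs := text.toList with hcs
  set L := cs.length with hL
  set n := (L + 2) / 3 with hn
  -- the chunk list
  have hchunks : (PySem.List.pyRange 0 ((pvToks cs).length : Int) 6).map
      (fun i => PySem.List.slice (pvToks cs) (some i) (some (i + 6)))
      = (List.range n).map (fun k => pvToks (List.take 3 (List.drop (3 * k) cs))) := by
    rw [PySem.List.pyRange_of_pos 0 ((pvToks cs).length : Int) (by norm_num), List.map_map,
        toks_length]
    have hcnt : (if (0:Int) < (2 * L : Nat) then ((((2 * L : Nat) : Int) - 0 + 6 - 1) / 6).toNat else 0) = n := by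
      rw [hn]; split_ifs with h <;> omega
    rw [show ((2 * L : Nat) : Int) = 2 * (L : Int) by push_cast; ring] at hcnt ⊢
    rw [hcnt]
    apply List.map_congr_left
    intro k hk
    simp only [Function.comp]
    rw [show (0 : Int) + 6 * (k : Int) = ((6 * k : Nat) : Int) by push_cast; ring,
        show ((6 * k : Nat) : Int) + 6 = ((6 * k + 6 : Nat) : Int) by push_cast; ring,
        PySem.List.slice_natCast]
    rw [show (6 * k + 6) - 6 * k = 2 * 3 by omega, show 6 * k = 2 * (3 * k) by ring,
        toks_drop, toks_take]
  rw [hchunks]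
  simp only [List.length_map, List.length_range]
  -- the loop: firstline is true exactly at index 0
  have hfold := foldl_firstline (β := List Int)
    (fun b p => (([((n : Int) - ((p.2 : Int) + 1)) * 16]
      ++ [(if b then (1 : Int) else 0) * 64 + input]
      ++ (List.range 6).map (fun j =>
            if j < p.1.length then (PySem.Int.ofCharsBase? (p.1.getD j []) 16).getD 0 else 0)).take 8))
    ((List.range n).map (fun k => pvToks (List.take 3 (List.drop (3 * k) cs)))) 0 []
  rw [show decide ((0 : Nat) = 0) = true from rfl] at hfold
  rw [hfold]
  simp only [List.nil_append]
  congr 1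
  apply List.ext_getElem
  · simp
  · intro i h1 h2
    simp only [List.getElem_map, List.getElem_zipIdx, List.getElem_range]
    have hd3 : (List.take 3 (List.drop (3 * i) cs)).length ≤ 3 := by
      simp [List.length_take]
    have h128d : ∀ c ∈ List.take 3 (List.drop (3 * i) cs), c.toNat < 128 := by
      intro c hc
      exact h128 c (List.mem_of_mem_drop (List.mem_of_mem_take hc))
    have htake : ∀ (a b : Int) (f : Nat → Int),
        ([a] ++ [b] ++ (List.range 6).map f).take 8 = a :: b :: (List.range 6).map f := by
      intro a b f
      apply List.take_of_length_le
      simp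
    rw [htake, frame_eq _ hd3 h128d]
    simp only [Nat.zero_add]
    have hb : (if decide (i = 0) then (1 : Int) else 0) * 64 + input
        = (if i = 0 then (64 : Int) else 0) + input := by
      by_cases h : i = 0 <;> simp [h]
    rw [hb]
    simp

-- ===== VERDICT (by name: the statement is the Claim_ definition above) =====
theorem format_text_to_can_chunks_spec : Claim_equal_format_text_to_can_chunks := by
  intro text input hdom
  unfold Spec_format_text_to_can_chunks
  apply ports_eq
  intro c hc
  unfold Dom_format_text_to_can_chunks pvDomStr at hdom
  rw [Bool.and_eq_true, List.all_eq_true] at hdom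
  have := hdom.1 c hc
  unfold pvDomChar at this
  simp only [Bool.or_eq_true, Bool.and_eq_true, decide_eq_true_eq, beq_iff_eq] at this
  omega
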